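-- pv_equiv track=rewrite | github.com/Gooit/Interpreter | interpreter/__init__.py | check_dangerous_code
-- ===== SOURCE A (Python) =====
-- def check_dangerous_code(code):
--     danger_package = [
--         'os', 'path', 'net', 'sql', 'syslog', 'http', 'mail', 'rpc', 'smtp', 'exec', 'user',
--     ]
--     for item in danger_package:
--         if code.find('"%s"' % item) >= 0:
--             return False
--     return True
-- ===== SOURCE B (Python) =====
-- def check_dangerous_code(code):
--     names = ('os', 'path', 'net', 'sql', 'syslog', 'http', 'mail', 'rpc', 'smtp', 'exec', 'user')
--     for i in range(len(code)):
--         if code[i] == '"':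
--             rest = code[i + 1:]
--             for name in names:
--                 if rest.startswith(name + '"'):
--                     return False
--     return True
-- ===== Notes on version B (the rewrite author's own statement) =====
-- stated objective: alternative
-- what changed: B makes a single left-to-right scan of the string, testing at each double quote whether one of the 11 names followed by a closing quote starts there, instead of A's 11 separate full str.find scans.
import Mathlib
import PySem

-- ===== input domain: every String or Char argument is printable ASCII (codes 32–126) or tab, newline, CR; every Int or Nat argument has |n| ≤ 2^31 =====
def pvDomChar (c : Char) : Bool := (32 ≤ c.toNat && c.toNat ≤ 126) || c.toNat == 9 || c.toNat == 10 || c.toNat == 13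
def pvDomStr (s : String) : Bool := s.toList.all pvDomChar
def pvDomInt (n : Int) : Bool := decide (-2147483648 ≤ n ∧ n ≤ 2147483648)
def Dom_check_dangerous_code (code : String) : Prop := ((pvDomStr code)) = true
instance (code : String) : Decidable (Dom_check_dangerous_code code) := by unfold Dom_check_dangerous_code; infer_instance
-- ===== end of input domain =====

-- B replaces A's eleven separate str.find scans by a single left-to-right scan that
-- tests, at each '"', whether one of the names followed by a closing quote starts there (objective: alternative).

-- ===== PORT A =====
def pvDangerPackages : List String :=
  ["os", "path", "net", "sql", "syslog", "http", "mail", "rpc", "smtp", "exec", "user"]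

-- A's for-loop over the danger list, returning False on the first hit
def pvALoop (code : String) : List String → Bool
  | [] => true
  | item :: rest =>
    if PySem.Str.find code ("\"" ++ item ++ "\"") ≥ 0 then false
    else pvALoop code rest

def check_dangerous_code (code : String) : Bool :=
  pvALoop code pvDangerPackages

-- ===== PORT B =====
-- B's outer loop over positions i, as structural recursion over the suffix code[i:]
def pvBScan : List Char → Bool
  | [] => true
  | c :: rest =>
    if (c == '"') && pvDangerPackages.any (fun name => PySem.Chars.startswith rest (name.toList ++ ['"'])) then
      false
    else pvBScan rest

def check_dangerous_code_alt (code : String) : Bool :=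
  pvBScan code.toList

-- ===== PRECONDITION & SPEC =====
def Spec_check_dangerous_code (code : String) (out : Bool) : Prop := out = check_dangerous_code_alt code
instance (code : String) (out : Bool) : Decidable (Spec_check_dangerous_code code out) := by unfold Spec_check_dangerous_code; infer_instance

-- ===== CLAIM (what is proved, stated in full; the proofs are below) =====
def Claim_equal_check_dangerous_code : Prop := ∀ (code : String), Dom_check_dangerous_code code → Spec_check_dangerous_code code (check_dangerous_code code)

-- ===== LEMMAS AND PROOFS =====

theorem pvALoop_eq_true_iff (code : String) (l : List String) :
    pvALoop code l = true ↔ ∀ item ∈ l, ¬ ('"' :: (item.toList ++ ['"'])) <:+: code.toList := by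
  induction l with
  | nil => simp [pvALoop]
  | cons item rest ih =>
    simp only [pvALoop]
    by_cases h : PySem.Str.find code ("\"" ++ item ++ "\"") ≥ 0
    · simp only [h, if_true]
      constructor
      · intro hfalse; cases hfalse
      · intro hall
        exfalso
        have := (PySem.Chars.find_nonneg_iff code.toList ("\"" ++ item ++ "\"").toList).mp (by
          simpa [PySem.Str.find_eq] using h)
        exact hall item (by simp) (by simpa [String.toList_append] using this)
    · simp only [h, if_false, ih]
      constructor
      · intro hall x hx
        rcases List.mem_cons.mp hx with hx | hx
        · subst hx
          intro hinf
          apply h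
          rw [ge_iff_le, PySem.Str.find_eq, PySem.Chars.find_nonneg_iff]
          simpa [String.toList_append] using hinf
        · exact hall x hx
      · intro hall x hx; exact hall x (List.mem_cons_of_mem _ hx)

theorem pvBScan_eq_true_iff (s : List Char) :
    pvBScan s = true ↔ ∀ item ∈ pvDangerPackages, ¬ ('"' :: (item.toList ++ ['"'])) <:+: s := by
  induction s with
  | nil =>
    simp [pvBScan]
  | cons c rest ih =>
    simp only [pvBScan]
    by_cases hc : ((c == '"') && pvDangerPackages.any (fun name => PySem.Chars.startswith rest (name.toList ++ ['"']))) = true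
    · rw [if_pos hc]
      constructor
      · intro hfalse; cases hfalse
      · intro hall
        exfalso
        simp only [Bool.and_eq_true, List.any_eq_true, beq_iff_eq] at hc
        rcases hc with ⟨hq, name, hmem, hstart⟩
        have hpre : (name.toList ++ ['"']) <+: rest := (PySem.Chars.startswith_iff _ _).mp hstart
        apply hall name hmem
        have : ('"' :: (name.toList ++ ['"'])) <+: (c :: rest) := by
          rw [List.cons_prefix_cons]
          exact ⟨hq.symm, hpre⟩
        exact this.isInfix
    · rw [if_neg hc, ih]
      have hnostart : ∀ item ∈ pvDangerPackages, ¬ ('"' :: (item.toList ++ ['"'])) <+: (c :: rest) := by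
        intro item hmem hpre
        rw [List.cons_prefix_cons] at hpre
        apply hc
        simp only [Bool.and_eq_true, beq_iff_eq]
        refine ⟨hpre.1.symm, List.any_eq_true.mpr ⟨item, hmem, ?_⟩⟩
        exact (PySem.Chars.startswith_iff _ _).mpr hpre.2
      constructor
      · intro hall item hmem hinf
        rcases (List.infix_cons_iff).mp hinf with hpre | hinf'
        · exact hnostart item hmem hpre
        · exact hall item hmem hinf'
      · intro hall item hmem hinf
        exact hall item hmem (hinf.trans (List.suffix_cons c rest).isInfix)

-- ===== VERDICT (by name: the statement is the Claim_ definition above) =====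
theorem check_dangerous_code_spec : Claim_equal_check_dangerous_code := by
  intro code _
  unfold Spec_check_dangerous_code check_dangerous_code check_dangerous_code_alt
  rcases hb : pvBScan code.toList with _ | _
  · rcases ha : pvALoop code pvDangerPackages with _ | _
    · rfl
    · exfalso
      have := (pvALoop_eq_true_iff code pvDangerPackages).mp ha
      have hb' := (pvBScan_eq_true_iff code.toList).mpr this
      rw [hb] at hb'; cases hb'
  · have := (pvBScan_eq_true_iff code.toList).mp hb
    exact (pvALoop_eq_true_iff code pvDangerPackages).mpr this
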